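-- pv_equiv track=rewrite | github.com/npt-1707/icl-selective-annotation | utils.py | slot_values_to_seq_sql
-- ===== SOURCE A (Python) =====
-- from collections import OrderedDict
--
-- def slot_values_to_seq_sql(original_slot_values, single_answer=False):
--     sql_str = ""
--     tables = OrderedDict()
--     col_value = dict()
--
--     # add '_' in SQL columns
--     slot_values = {}
--     for slot, value in original_slot_values.items():
--         if " " in slot:
--             slot = slot.replace(" ", "_")
--         slot_values[slot] = value
--
--     for slot, value in slot_values.items():
--         assert len(slot.split("-")) == 2
--
--         if "|" in value:
--             value = value.split("|")[0]
--
--         table, col = slot.split("-")  # slot -> table-col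
--
--         if table not in tables.keys():
--             tables[table] = []
--         tables[table].append(col)
--
--         # sometimes the answer is ambiguous
--         if single_answer:
--             value = value.split("|")[0]
--         col_value[slot] = value
--
--     # When there is only one table
--     if len(tables.keys()) == 1:
--         where_clause = []
--         table = list(tables.keys())[0]
--         for col in tables[table]:
--             where_clause.append(
--                 "{} = {}".format(col, col_value["{}-{}".format(table, col)])
--             )
--         sql_str = "SELECT * FROM {} WHERE {}".format(table, " AND ".join(where_clause))
--     # When there are more than one table
--     else:
--         # We observed that Codex has variety in the table short names, here we just use a simple version.
--         from_clause = []
--         where_clause = []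
--         for i, table in enumerate(tables.keys()):
--             t_i = "t{}".format(i + 1)
--             from_clause.append("{} AS {}".format(table, t_i))
--             for col in tables[table]:
--                 where_clause.append(
--                     "{}.{} = {}".format(t_i, col, col_value["{}-{}".format(table, col)])
--                 )
--         sql_str = "SELECT * FROM {} WHERE {}".format(
--             ", ".join(from_clause), " AND ".join(where_clause)
--         )
--
--     return sql_str
-- ===== SOURCE B (Python) =====
-- def slot_values_to_seq_sql(original_slot_values, single_answer=False):
--     # stage 1: normalized (slot, value) list -- no dicts anywhere:
--     # spaces -> underscores; on a repeated slot the stored pair is overwritten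
--     # in place (first-occurrence position, last value), like dict assignment
--     pairs = []
--     for slot, value in original_slot_values.items():
--         slot = slot.replace(" ", "_")
--         for j, (s, _) in enumerate(pairs):
--             if s == slot:
--                 pairs[j] = (slot, value)
--                 break
--         else:
--             pairs.append((slot, value))
--
--     # stage 2: flatten to (table, col, value) triples
--     triples = []
--     for slot, value in pairs:
--         table, col = slot.split("-")  # ValueError unless exactly one '-'
--         if "|" in value:
--             value = value.split("|")[0]
--         if single_answer:
--             value = value.split("|")[0]
--         triples.append((table, col, value))
--
--     # stage 3: distinct tables, in order of first appearance
--     tables = []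
--     for table, _, _ in triples:
--         if table not in tables:
--             tables.append(table)
--
--     # stage 4: format, filtering the flat triple list once per table
--     if len(tables) == 1:
--         t = tables[0]
--         where = " AND ".join(
--             "{} = {}".format(c, v) for tb, c, v in triples if tb == t
--         )
--         return "SELECT * FROM {} WHERE {}".format(t, where)
--     from_clause = ", ".join(
--         "{} AS t{}".format(t, i + 1) for i, t in enumerate(tables)
--     )
--     where = " AND ".join(
--         "t{}.{} = {}".format(i + 1, c, v)
--         for i, t in enumerate(tables)
--         for tb, c, v in triples
--         if tb == t
--     )
--     return "SELECT * FROM {} WHERE {}".format(from_clause, where)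
-- ===== Notes on version B (the rewrite author's own statement) =====
-- stated objective: alternative
-- what changed: B uses no dictionaries at all: it normalizes into a plain overwrite-in-place pair list, flattens to a single list of (table, col, value) triples, collects the distinct tables as a list, and emits each table's WHERE fragments by filtering the flat triple list per table, instead of A's two accumulated dicts (table->columns, slot->value) with the slot key rebuilt by string formatting and looked up per column.
import Mathlib
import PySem

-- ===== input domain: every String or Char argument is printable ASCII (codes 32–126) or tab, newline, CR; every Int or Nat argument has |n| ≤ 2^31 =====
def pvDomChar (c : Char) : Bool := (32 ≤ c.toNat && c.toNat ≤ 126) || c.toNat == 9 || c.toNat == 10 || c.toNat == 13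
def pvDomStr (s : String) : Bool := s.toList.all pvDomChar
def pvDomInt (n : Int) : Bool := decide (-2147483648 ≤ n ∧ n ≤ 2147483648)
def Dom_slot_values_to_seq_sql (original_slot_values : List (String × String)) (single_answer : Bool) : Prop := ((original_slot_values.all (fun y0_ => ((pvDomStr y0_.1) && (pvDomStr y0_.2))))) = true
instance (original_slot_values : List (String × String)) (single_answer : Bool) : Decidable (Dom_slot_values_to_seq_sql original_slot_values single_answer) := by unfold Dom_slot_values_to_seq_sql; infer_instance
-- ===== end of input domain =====

-- B replaces A's two accumulated dicts (table->cols plus slot->value with a rebuilt-key lookup) by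
-- dict-free staged list passes over a flat (table, col, value) triple list, filtered once per table;
-- objective: alternative (same result, no speed claim). RETURN value equivalence only.

-- shared small helpers (both Pythons contain these identical subexpressions)
-- slot.split("-")  (sep is non-empty, so split? is always `some`)
def pvSplitDash (s : String) : List String := (PySem.Str.split? s "-").getD []
-- the final value stored for a slot: split on "|" taking [0] when "|" occurs, and once more
-- when single_answer (split of a non-empty sep is never empty, so [0] is total)
def pvAnswer (single_answer : Bool) (value : String) : String :=
  let value := if PySem.Str.isIn "|" value then ((PySem.Str.split? value "|").getD []).headD "" else value
  if single_answer then ((PySem.Str.split? value "|").getD []).headD "" else value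

-- ===== PORT A =====
def slot_values_to_seq_sql (original_slot_values : List (String × String)) (single_answer : Bool) : String :=
  -- slot_values = { slot with ' ' replaced by '_' : value }
  let slot_values : PySem.Dict String String :=
    original_slot_values.foldl
      (fun d p =>
        d.insert (if PySem.Str.isIn " " p.1 then PySem.Str.replace p.1 " " "_" else p.1) p.2)
      PySem.Dict.empty
  -- second loop: tables (table -> list of cols) and col_value (slot -> value)
  let st : PySem.Dict String (List String) × PySem.Dict String String :=
    slot_values.items.foldl
      (fun st p =>
        ((if st.1.contains ((pvSplitDash p.1).headD "") then st.1
          else st.1.insert ((pvSplitDash p.1).headD "") []).modify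
            ((pvSplitDash p.1).headD "") [] (fun cs => cs ++ [(pvSplitDash p.1).getD 1 ""]),
         st.2.insert p.1 (pvAnswer single_answer p.2)))
      (PySem.Dict.empty, PySem.Dict.empty)
  let tables := st.1
  let col_value := st.2
  if tables.keys.length == 1 then
    -- list(tables.keys())[0]; the guard makes the list non-empty
    let table := tables.keys.headD ""
    let where_clause := (tables.getD table []).foldl
      (fun acc col => acc ++ [col ++ " = " ++ col_value.getD (table ++ "-" ++ col) ""]) []
    "SELECT * FROM " ++ table ++ " WHERE " ++ PySem.Str.join " AND " where_clause
  else
    let fw := (PySem.List.enumerate tables.keys).foldl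
      (fun fw it =>
        (fw.1 ++ [it.2 ++ " AS t" ++ PySem.Int.toStr (it.1 + 1)],
         (tables.getD it.2 []).foldl
           (fun wc col =>
             wc ++ ["t" ++ PySem.Int.toStr (it.1 + 1) ++ "." ++ col ++ " = " ++
                    col_value.getD (it.2 ++ "-" ++ col) ""])
           fw.2))
      ([], [])
    "SELECT * FROM " ++ PySem.Str.join ", " fw.1 ++ " WHERE " ++ PySem.Str.join " AND " fw.2

-- ===== PORT B =====
-- Source B's inner scan: overwrite the first pair whose slot matches, else append at the end
def pvStore : List (String × String) → String → String → List (String × String)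
  | [], slot, value => [(slot, value)]
  | p :: rest, slot, value =>
      if p.1 == slot then (slot, value) :: rest else p :: pvStore rest slot value

def slot_values_to_seq_sql_alt (original_slot_values : List (String × String)) (single_answer : Bool) : String :=
  -- stage 1: normalized (slot, value) pair list, overwrite in place
  let pairs : List (String × String) :=
    original_slot_values.foldl (fun ps p => pvStore ps (PySem.Str.replace p.1 " " "_") p.2) []
  -- stage 2: flatten to (table, col, value) triples
  let triples : List (String × String × String) :=
    pairs.foldl (fun ts p =>
      ts ++ [((pvSplitDash p.1).headD "",
              (pvSplitDash p.1).getD 1 "", pvAnswer single_answer p.2)]) []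
  -- stage 3: distinct tables, in order of first appearance
  let tables : List String :=
    triples.foldl (fun tb tr => if tb.contains tr.1 then tb else tb ++ [tr.1]) []
  -- stage 4: format, filtering the flat triple list once per table
  if tables.length == 1 then
    let t := tables.headD ""
    "SELECT * FROM " ++ t ++ " WHERE " ++
      PySem.Str.join " AND "
        ((triples.filter (fun tr => tr.1 == t)).map (fun tr => tr.2.1 ++ " = " ++ tr.2.2))
  else
    "SELECT * FROM " ++
      PySem.Str.join ", " ((PySem.List.enumerate tables).map
        (fun it => it.2 ++ " AS t" ++ PySem.Int.toStr (it.1 + 1))) ++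
    " WHERE " ++
      PySem.Str.join " AND " ((PySem.List.enumerate tables).flatMap
        (fun it => (triples.filter (fun tr => tr.1 == it.2)).map
          (fun tr => "t" ++ PySem.Int.toStr (it.1 + 1) ++ "." ++ tr.2.1 ++ " = " ++ tr.2.2)))

-- ===== PRECONDITION & SPEC =====
-- Pre_ excludes exactly the inputs on which A raises: a slot whose normalized form does not split
-- on "-" into exactly two parts fails A's `assert len(slot.split("-")) == 2` (AssertionError);
-- B's tuple unpacking raises ValueError on the same inputs.
def Pre_slot_values_to_seq_sql (original_slot_values : List (String × String)) (single_answer : Bool) : Prop :=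
  ∀ p ∈ original_slot_values,
    ((PySem.Str.split? (PySem.Str.replace p.1 " " "_") "-").getD []).length = 2
instance (original_slot_values : List (String × String)) (single_answer : Bool) : Decidable (Pre_slot_values_to_seq_sql original_slot_values single_answer) := by unfold Pre_slot_values_to_seq_sql; infer_instance

def pvWitness_slot_values_to_seq_sql : (List (String × String)) × Bool :=
  ([("hotel-area", "north"), ("hotel price-range", "cheap|moderate"), ("train-day", "monday")], false)

def Spec_slot_values_to_seq_sql (original_slot_values : List (String × String)) (single_answer : Bool) (out : String) : Prop := out = slot_values_to_seq_sql_alt original_slot_values single_answer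
instance (original_slot_values : List (String × String)) (single_answer : Bool) (out : String) : Decidable (Spec_slot_values_to_seq_sql original_slot_values single_answer out) := by unfold Spec_slot_values_to_seq_sql; infer_instance

-- ===== CLAIM (what is proved, stated in full; the proofs are below) =====
def Claim_equal_slot_values_to_seq_sql : Prop := ∀ (original_slot_values : List (String × String)) (single_answer : Bool), Dom_slot_values_to_seq_sql original_slot_values single_answer → Pre_slot_values_to_seq_sql original_slot_values single_answer → Spec_slot_values_to_seq_sql original_slot_values single_answer (slot_values_to_seq_sql original_slot_values single_answer)

-- ===== LEMMAS AND PROOFS =====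

-- single-step reduction equations for the fuel-based scanners
lemma pv_go_zero (l cur : List Char) (acc : List (List Char)) :
    PySem.Chars.splitOn.go ['-'] 0 l cur acc = ((cur.reverse ++ l) :: acc).reverse := by
  rw [PySem.Chars.splitOn.go.eq_def]
lemma pv_go_nil (fuel : Nat) (cur : List Char) (acc : List (List Char)) :
    PySem.Chars.splitOn.go ['-'] (fuel+1) [] cur acc = (cur.reverse :: acc).reverse := by
  rw [PySem.Chars.splitOn.go.eq_def]
lemma pv_go_hit (fuel : Nat) (t cur : List Char) (acc : List (List Char)) :
    PySem.Chars.splitOn.go ['-'] (fuel+1) ('-' :: t) cur acc =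
      PySem.Chars.splitOn.go ['-'] fuel t [] (cur.reverse :: acc) := by
  rw [PySem.Chars.splitOn.go.eq_def]
  simp [List.isPrefixOf]
lemma pv_go_miss (fuel : Nat) (c : Char) (t cur : List Char) (acc : List (List Char))
    (h : c ≠ '-') :
    PySem.Chars.splitOn.go ['-'] (fuel+1) (c :: t) cur acc =
      PySem.Chars.splitOn.go ['-'] fuel t (c :: cur) acc := by
  rw [PySem.Chars.splitOn.go.eq_def]
  simp [List.isPrefixOf, beq_eq_false_iff_ne.mpr (Ne.symm h)]
lemma pv_rep_go_zero (l acc : List Char) :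
    PySem.Chars.replace.go [' '] ['_'] 0 l acc = acc.reverse ++ l := by
  rw [PySem.Chars.replace.go.eq_def]
lemma pv_rep_go_nil (fuel : Nat) (acc : List Char) :
    PySem.Chars.replace.go [' '] ['_'] (fuel+1) [] acc = acc.reverse := by
  rw [PySem.Chars.replace.go.eq_def]
lemma pv_rep_go_miss (fuel : Nat) (c : Char) (t acc : List Char) (h : c ≠ ' ') :
    PySem.Chars.replace.go [' '] ['_'] (fuel+1) (c :: t) acc =
      PySem.Chars.replace.go [' '] ['_'] fuel t (c :: acc) := by
  rw [PySem.Chars.replace.go.eq_def]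
  simp [List.isPrefixOf, beq_eq_false_iff_ne.mpr (Ne.symm h)]

-- `s.replace(" ", "_")` is the identity when `s` contains no space
lemma pv_rep_go : ∀ (l : List Char) (fuel : Nat) (acc : List Char), ' ' ∉ l →
    PySem.Chars.replace.go [' '] ['_'] fuel l acc = acc.reverse ++ l
  | [], 0, acc, _ => by rw [pv_rep_go_zero]
  | [], _ + 1, acc, _ => by rw [pv_rep_go_nil]; simp
  | c :: t, 0, acc, _ => by rw [pv_rep_go_zero]
  | c :: t, fuel + 1, acc, h => by
      simp only [List.mem_cons, not_or] at h
      rw [pv_rep_go_miss fuel c t acc (fun h' => h.1 h'.symm),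
        pv_rep_go t fuel (c :: acc) h.2]
      simp

lemma pv_replace_id (s : String) (h : PySem.Str.isIn " " s = false) :
    PySem.Str.replace s " " "_" = s := by
  have hsp : (" " : String).toList = [' '] := by decide
  have hm : ' ' ∉ s.toList := by
    have := PySem.Chars.isIn_eq_false_iff (sub := (" " : String).toList) (s := s.toList)
    rw [hsp] at this
    intro hmem
    exact (this.mp (by simpa [PySem.Str.isIn, hsp] using h)) ((List.singleton_infix_iff _ _).mpr hmem)
  have : PySem.Chars.replace s.toList (" " : String).toList ("_" : String).toList = s.toList := by
    rw [hsp, show ("_" : String).toList = ['_'] by decide]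
    rw [PySem.Chars.replace]
    simp only [List.isEmpty_cons, if_neg Bool.false_ne_true]
    rw [pv_rep_go s.toList s.toList.length [] hm]
    simp
  rw [PySem.Str.replace, this, String.ofList_toList]

-- characterization of split("-") when it yields exactly two parts
lemma pv_split_go_nosep : ∀ (l : List Char) (fuel : Nat) (cur : List Char) (acc : List (List Char)),
    '-' ∉ l → PySem.Chars.splitOn.go ['-'] fuel l cur acc = acc.reverse ++ [cur.reverse ++ l]
  | [], 0, cur, acc, _ => by rw [pv_go_zero]; simp
  | [], _ + 1, cur, acc, _ => by rw [pv_go_nil]; simp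
  | c :: t, 0, cur, acc, _ => by rw [pv_go_zero]; simp
  | c :: t, fuel + 1, cur, acc, h => by
      simp only [List.mem_cons, not_or] at h
      rw [pv_go_miss fuel c t cur acc (fun h' => h.1 h'.symm),
        pv_split_go_nosep t fuel (c :: cur) acc h.2]
      simp

lemma pv_split_go_consume : ∀ (a r : List Char) (fuel : Nat) (cur : List Char)
    (acc : List (List Char)), '-' ∉ a → a.length < fuel →
    PySem.Chars.splitOn.go ['-'] fuel (a ++ '-' :: r) cur acc =
      PySem.Chars.splitOn.go ['-'] (fuel - (a.length + 1)) r [] ((cur.reverse ++ a) :: acc)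
  | [], r, fuel + 1, cur, acc, _, _ => by
      rw [List.nil_append, pv_go_hit]
      simp
  | c :: a', r, fuel + 1, cur, acc, h, hf => by
      simp only [List.mem_cons, not_or] at h
      rw [List.cons_append, pv_go_miss fuel c (a' ++ '-' :: r) cur acc (fun h' => h.1 h'.symm),
        pv_split_go_consume a' r fuel (c :: cur) acc h.2
          (by simp only [List.length_cons] at hf; omega)]
      have h1 : fuel - (a'.length + 1) = fuel + 1 - ((c :: a').length + 1) := by
        simp only [List.length_cons]; omega
      have h2 : ((c :: cur).reverse ++ a') = cur.reverse ++ (c :: a') := by simp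
      rw [h1, h2]

lemma pv_split_go_acc : ∀ (l : List Char) (fuel : Nat) (cur : List Char) (acc : List (List Char)),
    PySem.Chars.splitOn.go ['-'] fuel l cur acc =
      acc.reverse ++ PySem.Chars.splitOn.go ['-'] fuel l cur []
  | [], 0, cur, acc => by rw [pv_go_zero, pv_go_zero]; simp
  | [], _ + 1, cur, acc => by rw [pv_go_nil, pv_go_nil]; simp
  | c :: t, 0, cur, acc => by rw [pv_go_zero, pv_go_zero]; simp
  | c :: t, fuel + 1, cur, acc => by
      by_cases hc : c = '-'
      · subst hc
        rw [pv_go_hit, pv_go_hit, pv_split_go_acc t fuel [] (cur.reverse :: acc),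
          pv_split_go_acc t fuel [] [cur.reverse]]
        simp
      · rw [pv_go_miss fuel c t cur acc hc, pv_go_miss fuel c t cur [] hc,
          pv_split_go_acc t fuel (c :: cur) acc]

lemma pv_splitOn_nosep (s : List Char) (h : '-' ∉ s) :
    PySem.Chars.splitOn s ['-'] = [s] := by
  rw [PySem.Chars.splitOn, pv_split_go_nosep s (s.length + 1) [] [] h]; simp

lemma pv_splitOn_cons (a r : List Char) (h : '-' ∉ a) :
    PySem.Chars.splitOn (a ++ '-' :: r) ['-'] = a :: PySem.Chars.splitOn r ['-'] := by
  rw [PySem.Chars.splitOn,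
    pv_split_go_consume a r ((a ++ '-' :: r).length + 1) [] [] h (by simp)]
  have hf : (a ++ '-' :: r).length + 1 - (a.length + 1) = r.length + 1 := by simp
  rw [hf, pv_split_go_acc r (r.length + 1) [] [List.reverse [] ++ a]]
  rw [PySem.Chars.splitOn]
  simp

lemma pv_mem_decomp : ∀ (s : List Char), '-' ∈ s → ∃ a r, '-' ∉ a ∧ s = a ++ '-' :: r
  | [], h => absurd h (List.not_mem_nil)
  | c :: t, h => by
      by_cases hc : c = '-'
      · exact ⟨[], t, by simp, by simp [hc]⟩
      · obtain ⟨a, r, ha, hr⟩ := pv_mem_decomp t (by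
          have h2 : '-' = c ∨ '-' ∈ t := List.mem_cons.mp h
          rcases h2 with h' | h'
          · exact absurd h'.symm hc
          · exact h')
        refine ⟨c :: a, r, ?_, by simp [hr]⟩
        simp only [List.mem_cons, not_or]
        exact ⟨fun h' => hc h'.symm, ha⟩

lemma pv_splitOn_ne_nil (s : List Char) : PySem.Chars.splitOn s ['-'] ≠ [] := by
  by_cases hm : '-' ∈ s
  · obtain ⟨a, r, ha, rfl⟩ := pv_mem_decomp s hm
    rw [pv_splitOn_cons a r ha]; simp
  · rw [pv_splitOn_nosep s hm]; simp

lemma pv_split2 (s : List Char) (h : (PySem.Chars.splitOn s ['-']).length = 2) :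
    ∃ a b, PySem.Chars.splitOn s ['-'] = [a, b] ∧ s = a ++ '-' :: b := by
  by_cases hm : '-' ∈ s
  · obtain ⟨a, r, ha, rfl⟩ := pv_mem_decomp s hm
    rw [pv_splitOn_cons a r ha] at h ⊢
    by_cases hr : '-' ∈ r
    · obtain ⟨a', r', ha', rfl⟩ := pv_mem_decomp r hr
      rw [pv_splitOn_cons a' r' ha'] at h
      simp only [List.length_cons] at h
      exact absurd (List.length_eq_zero_iff.mp (by omega)) (pv_splitOn_ne_nil r')
    · rw [pv_splitOn_nosep r hr]
      exact ⟨a, r, rfl, rfl⟩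
  · rw [pv_splitOn_nosep s hm] at h
    simp at h

lemma pv_rejoin (s : String) (h : (pvSplitDash s).length = 2) :
    (pvSplitDash s).headD "" ++ "-" ++ (pvSplitDash s).getD 1 "" = s := by
  have hds : ("-" : String).toList = ['-'] := by decide
  have hsplit : pvSplitDash s = (PySem.Chars.splitOn s.toList ['-']).map String.ofList := by
    rw [pvSplitDash, PySem.Str.split?, PySem.Chars.split?, hds]
    simp
  rw [hsplit] at h ⊢
  obtain ⟨a, b, hab, hs⟩ := pv_split2 s.toList (by simpa using h)
  rw [hab]
  apply String.toList_inj.mp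
  simp [hds, hs]

-- the conditional-insert before an append reduces to a plain `modify`
lemma pv_if_insert_modify {ν : Type} (d : PySem.Dict String (List ν)) (k : String)
    (f : List ν → List ν) :
    (if d.contains k then d else d.insert k []).modify k [] f = d.modify k [] f := by
  by_cases h : d.contains k = true
  · simp [h]
  · simp only [Bool.not_eq_true] at h
    rw [if_neg (by simp [h])]
    simp only [PySem.Dict.modify]
    rw [PySem.Dict.getD_insert_self, PySem.Dict.insert_insert_self,
      PySem.Dict.getD_of_not_contains d [] h]

-- Source B's overwrite-in-place scan, characterised on a list with distinct slots
lemma pvStore_eq_list : ∀ (l : List (String × String)) (k v : String),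
    (l.map Prod.fst).Nodup →
    pvStore l k v = if k ∈ l.map Prod.fst
      then l.map (fun p => if p.1 == k then (k, v) else p)
      else l ++ [(k, v)]
  | [], k, v, _ => by simp [pvStore]
  | p :: rest, k, v, h => by
      simp only [List.map_cons, List.nodup_cons] at h
      by_cases hk : p.1 = k
      · have hnr : k ∉ rest.map Prod.fst := hk ▸ h.1
        have hid : rest.map (fun q : String × String => if q.1 == k then (k, v) else q) = rest := by
          conv_rhs => rw [← List.map_id rest]
          apply List.map_congr_left
          intro q hq
          have hq1 : q.1 ≠ k := fun he => hnr (he ▸ List.mem_map_of_mem (f := Prod.fst) hq)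
          simp [hq1]
        rw [pvStore, if_pos (beq_iff_eq.mpr hk),
          if_pos (by simp [List.mem_cons, hk]), List.map_cons,
          if_pos (beq_iff_eq.mpr hk), hid]
      · rw [pvStore, if_neg (by simp [hk]), pvStore_eq_list rest k v h.2]
        by_cases hm : k ∈ rest.map Prod.fst
        · rw [if_pos hm, if_pos (by simp [List.mem_cons, hm]), List.map_cons,
            if_neg (by simp [hk])]
        · rw [if_neg hm,
            if_neg (by simp only [List.map_cons, List.mem_cons, not_or]
                       exact ⟨fun h' => hk h'.symm, hm⟩),
            List.cons_append]

-- on a Nodup-keyed dict, pvStore on the items IS dict insert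
lemma pvStore_items (d : PySem.Dict String String) (k v : String) (h : d.keys.Nodup) :
    pvStore d.items k v = (d.insert k v).items := by
  rw [PySem.Dict.items_insert,
    pvStore_eq_list d.items k v (by simpa [PySem.Dict.keys] using h),
    PySem.Dict.contains_eq_decide_mem_keys]
  by_cases hm : k ∈ d.items.map Prod.fst
  · rw [if_pos hm, if_pos (by simpa [PySem.Dict.keys] using hm)]
  · rw [if_neg hm, if_neg (by simpa [PySem.Dict.keys] using hm)]

-- Source B's stage-1 fold builds exactly the items list of A's normalization dict
lemma pvStore_foldl (f g : String × String → String) :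
    ∀ (l : List (String × String)) (d : PySem.Dict String String), d.keys.Nodup →
    l.foldl (fun ps p => pvStore ps (f p) (g p)) d.items =
      (l.foldl (fun d p => d.insert (f p) (g p)) d).items
  | [], _, _ => rfl
  | p :: rest, d, h => by
      rw [List.foldl_cons, List.foldl_cons, pvStore_items d (f p) (g p) h]
      exact pvStore_foldl f g rest (d.insert (f p) (g p))
        (PySem.Dict.nodup_keys_insert _ _ _ h)

-- ===== VERDICT (by name: the statement is the Claim_ definition above) =====

theorem slot_values_to_seq_sql_spec : Claim_equal_slot_values_to_seq_sql := by
  intro osv sa _hdom hpre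
  unfold Spec_slot_values_to_seq_sql
  simp only [slot_values_to_seq_sql, slot_values_to_seq_sql_alt]
  -- 1. A's conditional normalization equals B's unconditional replace
  have hnorm :
      (osv.foldl (fun d p =>
          d.insert (if PySem.Str.isIn " " p.1 then PySem.Str.replace p.1 " " "_" else p.1) p.2)
        PySem.Dict.empty)
      = (osv.foldl (fun d p => d.insert (PySem.Str.replace p.1 " " "_") p.2) PySem.Dict.empty) := by
    apply PySem.List.foldl_congr_mem
    intro acc p _
    have hsp2 : PySem.Str.isIn " " p.1 = PySem.Chars.isIn [' '] p.1.toList := by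
      rw [PySem.Str.isIn, show (" " : String).toList = [' '] from by decide]
    by_cases hsp : PySem.Str.isIn " " p.1 = true
    · simp [hsp2 ▸ hsp]
    · simp only [Bool.not_eq_true] at hsp
      rw [pv_replace_id p.1 hsp]
      simp [hsp2 ▸ hsp]
  rw [hnorm]
  set sv := osv.foldl (fun d p => d.insert (PySem.Str.replace p.1 " " "_") p.2) PySem.Dict.empty with hsv
  -- 2. facts about the normalized dict
  have hnodupsv : sv.keys.Nodup := by
    rw [hsv]
    exact PySem.Dict.nodup_keys_foldl_insert_key osv (fun p => PySem.Str.replace p.1 " " "_")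
      (fun _ p => p.2) PySem.Dict.empty (by simp [PySem.Dict.keys_empty])
  have hkeysv : sv.keys = PySem.Set.update []
      (osv.map (fun p => PySem.Str.replace p.1 " " "_")) := by
    rw [hsv, PySem.Dict.keys_foldl_insert_key osv (fun p => PySem.Str.replace p.1 " " "_")
      (fun _ p => p.2) PySem.Dict.empty, PySem.Dict.keys_empty]
  have hL2 : ∀ p ∈ sv.items, (pvSplitDash p.1).length = 2 := by
    intro p hp
    have hk : p.1 ∈ sv.keys := PySem.Dict.mem_keys_of_mem_items sv hp
    rw [hkeysv] at hk
    rcases (PySem.Set.mem_update _ _ _).mp hk with h | h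
    · cases h
    · obtain ⟨q, hq, hqe⟩ := List.mem_map.mp h
      rw [← hqe]
      exact hpre q hq
  have hrejoin : ∀ p ∈ sv.items,
      (pvSplitDash p.1).headD "" ++ "-" ++ (pvSplitDash p.1).getD 1 "" = p.1 :=
    fun p hp => pv_rejoin p.1 (hL2 p hp)
  -- 3. B's stage 1 builds sv.items
  have hpairs : osv.foldl (fun ps p => pvStore ps (PySem.Str.replace p.1 " " "_") p.2) [] =
      sv.items := by
    rw [hsv, ← pvStore_foldl (fun p => PySem.Str.replace p.1 " " "_") (fun p => p.2) osv
      PySem.Dict.empty (by simp [PySem.Dict.keys_empty])]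
    rfl
  -- 4. B's stage 2 is a map
  have htr : List.foldl (fun ts (p : String × String) =>
        ts ++ [((pvSplitDash p.1).headD "", (pvSplitDash p.1).getD 1 "", pvAnswer sa p.2)])
        [] sv.items
      = sv.items.map (fun p =>
        ((pvSplitDash p.1).headD "", (pvSplitDash p.1).getD 1 "", pvAnswer sa p.2)) := by
    rw [PySem.List.foldl_append_singleton_eq_map]
    exact List.nil_append _
  rw [hpairs, htr]
  set triples := sv.items.map (fun p =>
    ((pvSplitDash p.1).headD "", (pvSplitDash p.1).getD 1 "", pvAnswer sa p.2)) with htriples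
  -- 5. B's stage 3 collects the distinct tables
  have htbl : triples.foldl (fun tb tr => if tb.contains tr.1 then tb else tb ++ [tr.1]) [] =
      PySem.Set.update [] (sv.items.map (fun p => (pvSplitDash p.1).headD "")) := by
    have hfun : (fun (tb : List String) (tr : String × String × String) =>
        if tb.contains tr.1 then tb else tb ++ [tr.1]) =
        (fun tb tr => PySem.Set.add tb tr.1) := by
      funext tb tr
      simp [PySem.Set.add, PySem.Set.contains_eq_listContains]
    rw [hfun, ← PySem.Set.update_map_eq_foldl_add, htriples, List.map_map]
    rfl
  rw [htbl]
  -- 6. split A's pair-state loop into two independent loops, reduce the table loop to `modify`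
  have hpair : (List.foldl (fun (st : PySem.Dict String (List String) × PySem.Dict String String) (p : String × String) =>
        ((if st.1.contains ((pvSplitDash p.1).headD "") = true then st.1
            else st.1.insert ((pvSplitDash p.1).headD "") []).modify
            ((pvSplitDash p.1).headD "") [] fun cs => cs ++ [(pvSplitDash p.1).getD 1 ""],
          st.2.insert p.1 (pvAnswer sa p.2)))
        (PySem.Dict.empty, PySem.Dict.empty) sv.items)
      = (List.foldl (fun (t : PySem.Dict String (List String)) (p : String × String) => (if t.contains ((pvSplitDash p.1).headD "") = true then t
            else t.insert ((pvSplitDash p.1).headD "") []).modify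
            ((pvSplitDash p.1).headD "") [] (fun cs => cs ++ [(pvSplitDash p.1).getD 1 ""]))
          PySem.Dict.empty sv.items,
         List.foldl (fun (cv : PySem.Dict String String) (p : String × String) => cv.insert p.1 (pvAnswer sa p.2)) PySem.Dict.empty sv.items) :=
    PySem.List.foldl_prod_mk
      (f := fun (t : PySem.Dict String (List String)) (p : String × String) => (if t.contains ((pvSplitDash p.1).headD "") = true then t
          else t.insert ((pvSplitDash p.1).headD "") []).modify
          ((pvSplitDash p.1).headD "") [] (fun cs => cs ++ [(pvSplitDash p.1).getD 1 ""]))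
      (g := fun (cv : PySem.Dict String String) (p : String × String) => cv.insert p.1 (pvAnswer sa p.2)) sv.items _ _
  rw [hpair]
  dsimp only
  have hTfold : sv.items.foldl (fun (t : PySem.Dict String (List String)) (p : String × String) => (if t.contains ((pvSplitDash p.1).headD "") then t
        else t.insert ((pvSplitDash p.1).headD "") []).modify
        ((pvSplitDash p.1).headD "") [] (fun cs => cs ++ [(pvSplitDash p.1).getD 1 ""]))
      PySem.Dict.empty
      = sv.items.foldl (fun (t : PySem.Dict String (List String)) (p : String × String) => t.modify ((pvSplitDash p.1).headD "") []
          (fun cs => cs ++ [(pvSplitDash p.1).getD 1 ""])) PySem.Dict.empty :=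
    PySem.List.foldl_congr_mem _ _ _ _ (fun acc p _ => pv_if_insert_modify acc _ _)
  rw [hTfold]
  set T := sv.items.foldl (fun (t : PySem.Dict String (List String)) (p : String × String) => t.modify ((pvSplitDash p.1).headD "") []
      (fun cs => cs ++ [(pvSplitDash p.1).getD 1 ""])) PySem.Dict.empty with hT
  set C := sv.items.foldl (fun (cv : PySem.Dict String String) (p : String × String) => cv.insert p.1 (pvAnswer sa p.2)) PySem.Dict.empty with hC
  -- 7. contents of T and C
  have hTget : ∀ t, T.getD t [] =
      (sv.items.filter (fun p => (pvSplitDash p.1).headD "" == t)).map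
        (fun p => (pvSplitDash p.1).getD 1 "") := by
    intro t
    have h := PySem.Dict.getD_foldl_modify_append
      (sv.items.map (fun p => ((pvSplitDash p.1).headD "", (pvSplitDash p.1).getD 1 "")))
      PySem.Dict.empty t
    rw [List.foldl_map] at h
    simpa [hT, List.filter_map, Function.comp, PySem.Dict.getD_empty] using h
  have hTkeys : T.keys = PySem.Set.update []
      (sv.items.map (fun p => (pvSplitDash p.1).headD "")) := by
    rw [hT, PySem.Dict.keys_foldl_modify_key sv.items (fun p => (pvSplitDash p.1).headD "") []
      (fun _ p => fun cs => cs ++ [(pvSplitDash p.1).getD 1 ""]) PySem.Dict.empty,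
      PySem.Dict.keys_empty]
  have hCnodup : C.keys.Nodup := by
    rw [hC]
    exact PySem.Dict.nodup_keys_foldl_insert_key sv.items (fun p => p.1)
      (fun _ p => pvAnswer sa p.2) PySem.Dict.empty (by simp [PySem.Dict.keys_empty])
  have hCitems : C.items = sv.items.map (fun p => (p.1, pvAnswer sa p.2)) := by
    have h := PySem.Dict.items_foldl_insert_fresh sv.items (fun p => p.1)
      (fun p => pvAnswer sa p.2) PySem.Dict.empty
      (fun a _ => PySem.Dict.contains_empty _) (by simpa [PySem.Dict.keys] using hnodupsv)
    simpa [hC, PySem.Dict.empty] using h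
  have hCget : ∀ p ∈ sv.items, C.getD p.1 "" = pvAnswer sa p.2 := by
    intro p hp
    exact PySem.Dict.getD_of_mem_items C
      (by rw [hCitems]; exact List.mem_map_of_mem hp) hCnodup ""
  -- 8. per-table WHERE fragments: A's rebuilt-key lookup equals B's filtered triples
  have hW1 : ∀ t : String,
      (T.getD t []).map (fun col => col ++ " = " ++ C.getD (t ++ "-" ++ col) "") =
      (triples.filter (fun tr => tr.1 == t)).map (fun tr => tr.2.1 ++ " = " ++ tr.2.2) := by
    intro t
    rw [hTget, htriples, List.filter_map, List.map_map, List.map_map]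
    apply List.map_congr_left
    intro p hp
    have hpL : p ∈ sv.items := List.mem_of_mem_filter hp
    have hpt : (pvSplitDash p.1).headD "" = t := by
      have h := List.of_mem_filter hp
      simpa using h
    simp only [Function.comp]
    rw [← hpt, hrejoin p hpL, hCget p hpL]
  have hWn : ∀ (s t : String),
      (T.getD t []).map (fun col => s ++ "." ++ col ++ " = " ++ C.getD (t ++ "-" ++ col) "") =
      (triples.filter (fun tr => tr.1 == t)).map
        (fun tr => s ++ "." ++ tr.2.1 ++ " = " ++ tr.2.2) := by
    intro s t
    rw [hTget, htriples, List.filter_map, List.map_map, List.map_map]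
    apply List.map_congr_left
    intro p hp
    have hpL : p ∈ sv.items := List.mem_of_mem_filter hp
    have hpt : (pvSplitDash p.1).headD "" = t := by
      have h := List.of_mem_filter hp
      simpa using h
    simp only [Function.comp]
    rw [← hpt, hrejoin p hpL, hCget p hpL]
  -- 9. B's table list IS A's T.keys; then compare branch by branch
  rw [← hTkeys]
  by_cases hone : T.keys.length = 1
  · rw [if_pos (by simp [hone]), if_pos (by simp [hone])]
    rw [PySem.List.foldl_append_singleton_eq_map, List.nil_append,
      hW1 (T.keys.headD "")]
  · rw [if_neg (by simp [hone]), if_neg (by simp [hone])]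
    have hfw : List.foldl (fun (fw : List String × List String) (it : Int × String) =>
          (fw.1 ++ [it.2 ++ " AS t" ++ PySem.Int.toStr (it.1 + 1)],
           List.foldl (fun wc col => wc ++ ["t" ++ PySem.Int.toStr (it.1 + 1) ++ "." ++ col ++
               " = " ++ C.getD (it.2 ++ "-" ++ col) ""]) fw.2 (T.getD it.2 [])))
          ([], []) (PySem.List.enumerate T.keys)
        = (List.foldl (fun fc it => fc ++ [it.2 ++ " AS t" ++ PySem.Int.toStr (it.1 + 1)]) []
             (PySem.List.enumerate T.keys),
           List.foldl (fun wc it => List.foldl (fun wc col => wc ++ ["t" ++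
               PySem.Int.toStr (it.1 + 1) ++ "." ++ col ++ " = " ++
               C.getD (it.2 ++ "-" ++ col) ""]) wc (T.getD it.2 [])) []
             (PySem.List.enumerate T.keys)) :=
      PySem.List.foldl_prod_mk
        (f := fun (fc : List String) (it : Int × String) =>
          fc ++ [it.2 ++ " AS t" ++ PySem.Int.toStr (it.1 + 1)])
        (g := fun (wc : List String) (it : Int × String) =>
          List.foldl (fun wc col => wc ++ ["t" ++ PySem.Int.toStr (it.1 + 1) ++ "." ++ col ++
            " = " ++ C.getD (it.2 ++ "-" ++ col) ""]) wc (T.getD it.2 []))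
        (PySem.List.enumerate T.keys) [] []
    rw [hfw]
    dsimp only
    rw [PySem.List.foldl_append_singleton_eq_map, List.nil_append]
    have hinner : ∀ (wc : List String), ∀ it ∈ PySem.List.enumerate T.keys,
        List.foldl (fun wc col => wc ++ ["t" ++ PySem.Int.toStr (it.1 + 1) ++ "." ++ col ++
          " = " ++ C.getD (it.2 ++ "-" ++ col) ""]) wc (T.getD it.2 [])
        = wc ++ (T.getD it.2 []).map (fun col => "t" ++ PySem.Int.toStr (it.1 + 1) ++ "." ++
            col ++ " = " ++ C.getD (it.2 ++ "-" ++ col) "") :=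
      fun wc it _ => PySem.List.foldl_append_singleton_eq_map _ _ _
    rw [PySem.List.foldl_congr_mem _ _ _ _ hinner,
      PySem.List.foldl_append_eq_flatMap]
    have hflat : (fun (it : Int × String) => (T.getD it.2 []).map
          (fun col => "t" ++ PySem.Int.toStr (it.1 + 1) ++ "." ++ col ++ " = " ++
            C.getD (it.2 ++ "-" ++ col) ""))
        = fun (it : Int × String) => (triples.filter (fun tr => tr.1 == it.2)).map
            (fun tr => "t" ++ PySem.Int.toStr (it.1 + 1) ++ "." ++ tr.2.1 ++ " = " ++ tr.2.2) :=
      funext fun it => hWn ("t" ++ PySem.Int.toStr (it.1 + 1)) it.2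
    rw [List.nil_append, hflat]
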